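-- pv_equiv track=rewrite | github.com/daniel-reich/ubiquitous-fiesta | 6TJmj5gYEWBxPiuLD_5.py | seating_students
-- ===== SOURCE A (Python) =====
-- def seating_students(lst):
--   k, occupied = lst[0], set(lst[1:])
--   total = 0
--   for i in range(1, k):
--     if i not in occupied:
--       if i % 2 and i + 1 not in occupied:
--         total += 1
--       if i + 2 <= k and i + 2 not in occupied:
--         total += 1
--   return total
-- ===== SOURCE B (Python) =====
-- def seating_students(lst):
--     k = lst[0]
--     occupied = set(lst[1:])
--     if k < 2:
--         return 0
--     # baseline: all seats free -> k//2 adjacent odd pairs + (k-2) skip pairs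
--     total = k // 2 + (k - 2)
--     for s in occupied:
--         if 1 <= s <= k:
--             if s % 2 == 1 and s + 1 <= k:
--                 total -= 1          # kills adjacent pair (s, s+1)
--             if s % 2 == 0:
--                 total -= 1          # kills adjacent pair (s-1, s)
--             if s + 2 <= k:
--                 total -= 1          # kills skip pair (s, s+2)
--             if s >= 3:
--                 total -= 1          # kills skip pair (s-2, s)
--             if s % 2 == 1 and s + 1 <= k and s + 1 in occupied:
--                 total += 1          # adjacent pair double-subtracted
--             if s + 2 <= k and s + 2 in occupied:
--                 total += 1          # skip pair double-subtracted
--     return total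
-- ===== Notes on version B (the rewrite author's own statement) =====
-- stated objective: faster
-- what changed: A scans every seat 1..k-1 and tests set membership per seat; B computes the all-free pair count in closed form (k//2 + (k-2)) and subtracts, via inclusion-exclusion, the pairs killed by each occupied seat, iterating only over the occupied seats.
import Mathlib
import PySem

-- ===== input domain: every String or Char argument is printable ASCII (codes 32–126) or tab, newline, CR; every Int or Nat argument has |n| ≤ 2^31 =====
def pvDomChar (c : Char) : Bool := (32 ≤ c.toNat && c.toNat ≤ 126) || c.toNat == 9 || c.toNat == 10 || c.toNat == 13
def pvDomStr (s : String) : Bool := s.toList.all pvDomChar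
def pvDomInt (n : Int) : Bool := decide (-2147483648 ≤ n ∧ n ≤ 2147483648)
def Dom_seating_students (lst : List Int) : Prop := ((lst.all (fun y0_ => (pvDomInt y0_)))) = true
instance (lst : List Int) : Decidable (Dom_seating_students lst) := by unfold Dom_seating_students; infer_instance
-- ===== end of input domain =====

-- B replaces A's scan over every seat 1..k-1 by a closed-form baseline plus an
-- inclusion-exclusion correction pass over the occupied seats only.

-- ===== PORT A =====
-- literal port of A: loop i = 1 .. k-1 over every seat, set-membership tests
def seating_students (lst : List Int) : Int :=
  match lst with
  | [] => 0   -- Python raises IndexError on lst[0]; excluded by Pre_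
  | k :: rest =>
    let occupied : PySem.Set Int := PySem.Set.ofList rest
    (PySem.List.pyRange 1 k).foldl (fun total i =>
      if !(occupied.contains i) then
        let total := if PySem.Int.mod i 2 ≠ 0 ∧ !(occupied.contains (i + 1)) then total + 1 else total
        if i + 2 ≤ k ∧ !(occupied.contains (i + 2)) then total + 1 else total
      else total) 0

-- ===== PORT B =====
-- literal port of B: baseline k//2 + (k-2), then one correction per occupied seat
def seating_students_alt (lst : List Int) : Int :=
  match lst with
  | [] => 0   -- Python raises IndexError on lst[0]; excluded by Pre_
  | k :: rest =>
    let occupied : PySem.Set Int := PySem.Set.ofList rest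
    if k < 2 then 0
    else
      occupied.foldl (fun total s =>
        if 1 ≤ s ∧ s ≤ k then
          let total := if PySem.Int.mod s 2 = 1 ∧ s + 1 ≤ k then total - 1 else total
          let total := if PySem.Int.mod s 2 = 0 then total - 1 else total
          let total := if s + 2 ≤ k then total - 1 else total
          let total := if 3 ≤ s then total - 1 else total
          let total := if PySem.Int.mod s 2 = 1 ∧ s + 1 ≤ k ∧ occupied.contains (s + 1) then total + 1 else total
          if s + 2 ≤ k ∧ occupied.contains (s + 2) then total + 1 else total
        else total) (PySem.Int.floordiv k 2 + (k - 2))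

-- ===== PRECONDITION & SPEC =====
-- Pre_ excludes only the empty list, on which Python A raises IndexError (lst[0]).
def Pre_seating_students (lst : List Int) : Prop := lst ≠ []
instance (lst : List Int) : Decidable (Pre_seating_students lst) := by unfold Pre_seating_students; infer_instance
def pvWitness_seating_students : List Int := [6, 2, 5]

def Spec_seating_students (lst : List Int) (out : Int) : Prop := out = seating_students_alt lst
instance (lst : List Int) (out : Int) : Decidable (Spec_seating_students lst out) := by unfold Spec_seating_students; infer_instance

-- ===== CLAIM (what is proved, stated in full; the proofs are below) =====
def Claim_equal_seating_students : Prop := ∀ (lst : List Int), Dom_seating_students lst → Pre_seating_students lst → Spec_seating_students lst (seating_students lst)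

-- ===== LEMMAS AND PROOFS =====

-- contribution of seat i to A's loop total
def pvT (L : List Int) (k i : Int) : Int :=
  if i ∈ L then 0
  else (if PySem.Int.mod i 2 ≠ 0 ∧ (i + 1) ∉ L then 1 else 0)
     + (if i + 2 ≤ k ∧ (i + 2) ∉ L then 1 else 0)

-- correction contributed by occupied seat s to B's baseline
def pvC (L : List Int) (k s : Int) : Int :=
  if 1 ≤ s ∧ s ≤ k then
      (if PySem.Int.mod s 2 = 1 ∧ s + 1 ≤ k then -1 else 0)
    + (if PySem.Int.mod s 2 = 0 then -1 else 0)
    + (if s + 2 ≤ k then -1 else 0)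
    + (if 3 ≤ s then -1 else 0)
    + (if PySem.Int.mod s 2 = 1 ∧ s + 1 ≤ k ∧ (s + 1) ∈ L then 1 else 0)
    + (if s + 2 ≤ k ∧ (s + 2) ∈ L then 1 else 0)
  else 0

def pvSA (L : List Int) (k : Int) : Int := ((PySem.List.pyRange 1 k).map (pvT L k)).sum
def pvSB (L : List Int) (k : Int) : Int :=
  PySem.Int.floordiv k 2 + (k - 2) + (L.map (pvC L k)).sum

-- A's loop body adds pvT
lemma pvA_fold (L : List Int) (k : Int) (l : List Int) (init : Int) :
    l.foldl (fun total i =>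
      if !((PySem.Set.contains L i)) then
        let total := if PySem.Int.mod i 2 ≠ 0 ∧ !(PySem.Set.contains L (i + 1)) then total + 1 else total
        if i + 2 ≤ k ∧ !(PySem.Set.contains L (i + 2)) then total + 1 else total
      else total) init = init + (l.map (pvT L k)).sum := by
  induction l generalizing init with
  | nil => simp
  | cons x xs ih =>
    simp only [List.foldl_cons, List.map_cons, List.sum_cons, ih]
    have h : (if !((PySem.Set.contains L x)) then
        let total := if PySem.Int.mod x 2 ≠ 0 ∧ !(PySem.Set.contains L (x + 1)) then init + 1 else init
        if x + 2 ≤ k ∧ !(PySem.Set.contains L (x + 2)) then total + 1 else total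
      else init) = init + pvT L k x := by
      simp only [pvT, Bool.not_eq_eq_eq_not, Bool.not_true, PySem.Set.contains_eq_listContains,
        List.contains_eq_mem, decide_eq_false_iff_not]
      split_ifs <;> simp_all <;> omega
    rw [h]; ring

-- B's loop body adds pvC
set_option maxHeartbeats 1000000 in
lemma pvB_step (L : List Int) (k : Int) (x init : Int) :
    (if 1 ≤ x ∧ x ≤ k then
          let total := if PySem.Int.mod x 2 = 1 ∧ x + 1 ≤ k then init - 1 else init
          let total := if PySem.Int.mod x 2 = 0 then total - 1 else total
          let total := if x + 2 ≤ k then total - 1 else total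
          let total := if 3 ≤ x then total - 1 else total
          let total := if PySem.Int.mod x 2 = 1 ∧ x + 1 ≤ k ∧ PySem.Set.contains L (x + 1) then total + 1 else total
          if x + 2 ≤ k ∧ PySem.Set.contains L (x + 2) then total + 1 else total
        else init) = init + pvC L k x := by
  simp only [pvC, PySem.Set.contains_eq_listContains, List.contains_eq_mem, decide_eq_true_eq]
  split_ifs <;> omega

lemma pvB_fold (L : List Int) (k : Int) (l : List Int) (init : Int) :
    l.foldl (fun total s =>
        if 1 ≤ s ∧ s ≤ k then
          let total := if PySem.Int.mod s 2 = 1 ∧ s + 1 ≤ k then total - 1 else total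
          let total := if PySem.Int.mod s 2 = 0 then total - 1 else total
          let total := if s + 2 ≤ k then total - 1 else total
          let total := if 3 ≤ s then total - 1 else total
          let total := if PySem.Int.mod s 2 = 1 ∧ s + 1 ≤ k ∧ PySem.Set.contains L (s + 1) then total + 1 else total
          if s + 2 ≤ k ∧ PySem.Set.contains L (s + 2) then total + 1 else total
        else total) init = init + (l.map (pvC L k)).sum := by
  have hfun : (fun (total s : Int) =>
        if 1 ≤ s ∧ s ≤ k then
          let total := if PySem.Int.mod s 2 = 1 ∧ s + 1 ≤ k then total - 1 else total
          let total := if PySem.Int.mod s 2 = 0 then total - 1 else total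
          let total := if s + 2 ≤ k then total - 1 else total
          let total := if 3 ≤ s then total - 1 else total
          let total := if PySem.Int.mod s 2 = 1 ∧ s + 1 ≤ k ∧ PySem.Set.contains L (s + 1) then total + 1 else total
          if s + 2 ≤ k ∧ PySem.Set.contains L (s + 2) then total + 1 else total
        else total)
      = (fun total s => total + pvC L k s) :=
    funext fun t => funext fun s => pvB_step L k s t
  rw [hfun, PySem.List.foldl_add]

-- a map-sum whose function vanishes off three distinct points, over a Nodup list
lemma pvSum_support3 (f : Int → Int) (a b c : Int) (hab : a ≠ b) (hac : a ≠ c) (hbc : b ≠ c)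
    (h0 : ∀ x, x ≠ a → x ≠ b → x ≠ c → f x = 0) :
    ∀ (L : List Int), L.Nodup →
      (L.map f).sum = (if a ∈ L then f a else 0) + (if b ∈ L then f b else 0) + (if c ∈ L then f c else 0) := by
  intro L hL
  induction L with
  | nil => simp
  | cons x xs ih =>
    obtain ⟨hx, hxs⟩ := List.nodup_cons.mp hL
    simp only [List.map_cons, List.sum_cons, ih hxs, List.mem_cons]
    by_cases h1 : x = a <;> by_cases h2 : x = b <;> by_cases h3 : x = c <;>
      subst_vars <;> simp_all <;> split_ifs <;> simp_all <;> ring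

lemma pvSum_sub (f g : Int → Int) (L : List Int) :
    (L.map f).sum - (L.map g).sum = (L.map (fun x => f x - g x)).sum := by
  induction L with
  | nil => simp
  | cons x xs ih => simp only [List.map_cons, List.sum_cons, ← ih]; ring

-- k = 2: both sides over the single seat 1
lemma pvBase (L : List Int) (hL : L.Nodup) : pvSA L 2 = pvSB L 2 := by
  have hr : PySem.List.pyRange 1 2 = [1] := by decide
  have hsum := pvSum_support3 (pvC L 2) 1 2 3 (by norm_num) (by norm_num) (by norm_num)
    (by intro x hx1 hx2 hx3
        simp only [pvC]
        rw [if_neg]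
        rintro ⟨h1, h2⟩
        omega) L hL
  simp only [pvSA, pvSB, hr, List.map_cons, List.map_nil, List.sum_cons, List.sum_nil, hsum]
  by_cases h1 : (1:Int) ∈ L <;> by_cases h2 : (2:Int) ∈ L <;> by_cases h3 : (3:Int) ∈ L <;>
    simp [pvT, pvC, h1, h2, h3]

-- the k → k+1 increment of A's sum equals the increment of B's baseline and corrections
set_option maxHeartbeats 4000000 in
lemma pvDelta (L : List Int) (k : Int) (hk : 2 ≤ k) :
    - pvT L k (k-1) + pvT L (k+1) (k-1) + pvT L (k+1) k
      = (PySem.Int.floordiv (k+1) 2 - PySem.Int.floordiv k 2) + 1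
        + ((if k-1 ∈ L then pvC L (k+1) (k-1) - pvC L k (k-1) else 0)
         + (if k ∈ L then pvC L (k+1) k - pvC L k k else 0)
         + (if k+1 ∈ L then pvC L (k+1) (k+1) - pvC L k (k+1) else 0)) := by
  have e1 : k - 1 + 1 = k := by ring
  have e2 : k - 1 + 2 = k + 1 := by ring
  have e3 : k + 1 + 1 = k + 2 := by ring
  have e4 : k + 1 + 2 = k + 3 := by ring
  simp only [pvT, pvC, e1, e2, e3, e4,
    PySem.Int.mod_eq_emod_of_pos (by norm_num : (0:Int) < 2),
    PySem.Int.floordiv_eq_ediv_of_pos (by norm_num : (0:Int) < 2)]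
  simp only [show ¬(k+2 ≤ k+1) from by omega, show ¬(k+2 ≤ k) from by omega,
    show ¬(k+3 ≤ k+1) from by omega, show ¬(k+3 ≤ k) from by omega,
    show ¬(k+1 ≤ k) from by omega,
    show (k+1 ≤ k+1) = True from eq_true le_rfl, show (k ≤ k) = True from eq_true le_rfl,
    show (1 ≤ k-1) = True from eq_true (by omega : (1:Int) ≤ k - 1),
    show (k-1 ≤ k) = True from eq_true (by omega : k - 1 ≤ k),
    show (k-1 ≤ k+1) = True from eq_true (by omega : k - 1 ≤ k + 1),
    show (1 ≤ k) = True from eq_true (by omega : (1:Int) ≤ k),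
    show (k ≤ k+1) = True from eq_true (by omega : k ≤ k + 1),
    show (1 ≤ k+1) = True from eq_true (by omega : (1:Int) ≤ k + 1),
    show (3 ≤ k+1) = True from eq_true (by omega : (3:Int) ≤ k + 1),
    false_and, and_false, if_false, and_true, true_and, if_true]
  by_cases ha : k - 1 ∈ L <;> by_cases hb : k ∈ L <;> by_cases hc : k + 1 ∈ L <;>
    simp only [ha, hb, hc, if_true, not_true, not_false_iff, and_true, and_false,
      if_false] <;>
    split_ifs <;> omega

-- pvC only changes at k-1, k, k+1 when the bound moves from k to k+1
lemma pvC_diff_zero (L : List Int) (k x : Int) (hx1 : x ≠ k - 1) (hx2 : x ≠ k) (hx3 : x ≠ k + 1) :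
    pvC L (k+1) x - pvC L k x = 0 := by
  simp only [pvC,
    show (x ≤ k + 1) = (x ≤ k) from by rw [eq_iff_iff]; omega,
    show (x + 1 ≤ k + 1) = (x + 1 ≤ k) from by rw [eq_iff_iff]; omega,
    show (x + 2 ≤ k + 1) = (x + 2 ≤ k) from by rw [eq_iff_iff]; omega]
  exact sub_self _

-- the inductive step
lemma pvStep (L : List Int) (hL : L.Nodup) (k : Int) (hk : 2 ≤ k)
    (ih : pvSA L k = pvSB L k) : pvSA L (k+1) = pvSB L (k+1) := by
  have hr1 : PySem.List.pyRange 1 (k+1) = PySem.List.pyRange 1 k ++ [k] :=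
    PySem.List.pyRange_one_succ_right (by omega)
  have hr2 : PySem.List.pyRange 1 k = PySem.List.pyRange 1 (k-1) ++ [k-1] := by
    have h := PySem.List.pyRange_one_succ_right (a := 1) (b := k-1) (by omega)
    rwa [sub_add_cancel] at h
  have hcong : (PySem.List.pyRange 1 (k-1)).map (pvT L (k+1))
      = (PySem.List.pyRange 1 (k-1)).map (pvT L k) := by
    apply List.map_congr_left
    intro i hi
    obtain ⟨hi1, hi2⟩ := (PySem.List.mem_pyRange_one).mp hi
    simp only [pvT,
      show (i + 2 ≤ k) = True from eq_true (by omega : i + 2 ≤ k),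
      show (i + 2 ≤ k + 1) = True from eq_true (by omega : i + 2 ≤ k + 1)]
  have hSA1 : pvSA L (k+1)
      = ((PySem.List.pyRange 1 (k-1)).map (pvT L k)).sum + pvT L (k+1) (k-1) + pvT L (k+1) k := by
    simp only [pvSA, hr1, hr2, List.map_append, List.sum_append, List.map_cons, List.map_nil,
      List.sum_cons, List.sum_nil, hcong]
    ring
  have hSA0 : pvSA L k = ((PySem.List.pyRange 1 (k-1)).map (pvT L k)).sum + pvT L k (k-1) := by
    simp only [pvSA, hr2, List.map_append, List.sum_append, List.map_cons, List.map_nil,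
      List.sum_cons, List.sum_nil]
    ring
  have hdiff : (L.map (pvC L (k+1))).sum - (L.map (pvC L k)).sum
      = (if k-1 ∈ L then pvC L (k+1) (k-1) - pvC L k (k-1) else 0)
      + (if k ∈ L then pvC L (k+1) k - pvC L k k else 0)
      + (if k+1 ∈ L then pvC L (k+1) (k+1) - pvC L k (k+1) else 0) := by
    rw [pvSum_sub]
    exact pvSum_support3 (fun x => pvC L (k+1) x - pvC L k x) (k-1) k (k+1)
      (by omega) (by omega) (by omega)
      (fun x hx1 hx2 hx3 => pvC_diff_zero L k x hx1 hx2 hx3) L hL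
  have hdelta := pvDelta L k hk
  have hB1 : pvSB L (k+1)
      = PySem.Int.floordiv (k+1) 2 + (k - 1) + (L.map (pvC L (k+1))).sum := by
    simp only [pvSB]; ring
  have hB0 : pvSB L k
      = PySem.Int.floordiv k 2 + (k - 2) + (L.map (pvC L k)).sum := by
    simp only [pvSB]
  linarith [hSA1, hSA0, hdiff, hdelta, ih, hB1, hB0]

lemma pvMain (L : List Int) (hL : L.Nodup) (k : Int) (hk : 2 ≤ k) : pvSA L k = pvSB L k := by
  induction k, hk using Int.le_induction with
  | base => exact pvBase L hL
  | succ k hk ih => exact pvStep L hL k hk ih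

-- ===== VERDICT (by name: the statement is the Claim_ definition above) =====
theorem seating_students_spec : Claim_equal_seating_students := by
  intro lst _ hpre
  unfold Spec_seating_students
  cases lst with
  | nil => exact absurd rfl hpre
  | cons k rest =>
    simp only [seating_students, seating_students_alt]
    have hL : (PySem.Set.ofList rest).Nodup := PySem.Set.nodup_ofList rest
    by_cases hk : k < 2
    · rw [PySem.List.pyRange_one_eq_nil (by omega), if_pos hk]
      simp
    · rw [if_neg hk, pvA_fold, pvB_fold]
      have := pvMain (PySem.Set.ofList rest) hL k (by omega)
      simp only [pvSA, pvSB] at this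
      omega
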